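-- pv_equiv track=rewrite | github.com/thesoundboard/thesoundboard.github.io | pythonscripts/createAudioComponents.py | getAudioDivEndLineNum
-- ===== SOURCE A (Python) =====
-- def getAudioDivEndLineNum(text):
--     num = 1
--     flag = False
--     for line in text:
--         if '<div id="audioDiv">' in line:
--             flag = True
--         if flag == True and '</div>' in line:
--             return num
--         num += 1
-- ===== SOURCE B (Python) =====
-- def getAudioDivEndLineNum(text):
--     lines = list(text)
--     i = next((k for k, line in enumerate(lines) if '<div id="audioDiv">' in line), None)
--     if i is None:
--         return None
--     j = next((k for k in range(i, len(lines)) if '</div>' in lines[k]), None)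
--     return None if j is None else j + 1
-- ===== Notes on version B (the rewrite author's own statement) =====
-- stated objective: alternative
-- what changed: Replaced A's single stateful pass (flag + running line counter) by a two-phase search: find the index of the first opener line, then find the first closer line at or after it.
import Mathlib
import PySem

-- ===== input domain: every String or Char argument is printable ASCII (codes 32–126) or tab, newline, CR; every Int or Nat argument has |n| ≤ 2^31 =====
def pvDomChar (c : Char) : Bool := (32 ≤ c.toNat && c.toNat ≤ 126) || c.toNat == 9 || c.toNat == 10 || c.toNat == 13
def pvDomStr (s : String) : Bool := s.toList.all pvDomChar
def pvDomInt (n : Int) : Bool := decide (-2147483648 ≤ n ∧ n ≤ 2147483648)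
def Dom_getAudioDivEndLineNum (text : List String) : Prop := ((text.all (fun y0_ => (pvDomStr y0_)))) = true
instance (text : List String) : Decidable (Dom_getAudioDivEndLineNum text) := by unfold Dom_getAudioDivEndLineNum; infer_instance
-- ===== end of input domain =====

-- B replaces A's single stateful pass (flag + running counter) by a two-phase search: find the opener's index, then the first closer at or after it; same cost, different decomposition.


-- ===== PORT A =====
-- A: one stateful pass — a flag set when the opener is seen, return the running 1-based counter at the first closer seen with the flag up
def goA_getAudioDivEndLineNum : List String → Int → Bool → Option Int
  | [], _, _ => none
  | line :: rest, num, flag =>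
    let flag := if PySem.Str.isIn "<div id=\"audioDiv\">" line then true else flag
    if flag = true && PySem.Str.isIn "</div>" line then some num
    else goA_getAudioDivEndLineNum rest (num + 1) flag

def getAudioDivEndLineNum (text : List String) : Option Int :=
  goA_getAudioDivEndLineNum text 1 false

-- ===== PORT B =====
-- B: two-phase search — index of the first opener line, then first closer line at or after it
def getAudioDivEndLineNum_alt (text : List String) : Option Int :=
  match text.findIdx? (fun line => PySem.Str.isIn "<div id=\"audioDiv\">" line) with
  | none => none
  | some i =>
    match (text.drop i).findIdx? (fun line => PySem.Str.isIn "</div>" line) with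
    | none => none
    | some j => some ((i : Int) + (j : Int) + 1)

-- ===== PRECONDITION & SPEC =====
def Spec_getAudioDivEndLineNum (text : List String) (out : Option Int) : Prop := out = getAudioDivEndLineNum_alt text
instance (text : List String) (out : Option Int) : Decidable (Spec_getAudioDivEndLineNum text out) := by unfold Spec_getAudioDivEndLineNum; infer_instance

-- ===== CLAIM (what is proved, stated in full; the proofs are below) =====
def Claim_equal_getAudioDivEndLineNum : Prop := ∀ (text : List String), Dom_getAudioDivEndLineNum text → Spec_getAudioDivEndLineNum text (getAudioDivEndLineNum text)

-- ===== LEMMAS AND PROOFS =====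

-- generic copy of A's loop over abstract predicates (so simp cannot rewrite the string tests)
def pvLoop (p q : String → Bool) : List String → Int → Bool → Option Int
  | [], _, _ => none
  | line :: rest, num, flag =>
    let flag := if p line then true else flag
    if flag = true && q line then some num
    else pvLoop p q rest (num + 1) flag

theorem goA_eq_pvLoop (text : List String) (num : Int) (flag : Bool) :
    goA_getAudioDivEndLineNum text num flag =
      pvLoop (fun line => PySem.Str.isIn "<div id=\"audioDiv\">" line)
             (fun line => PySem.Str.isIn "</div>" line) text num flag := by
  induction text generalizing num flag with
  | nil => rfl
  | cons h t ih => simp only [goA_getAudioDivEndLineNum, pvLoop, ih]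

theorem pvLoop_true (p q : String → Bool) (text : List String) (num : Int) :
    pvLoop p q text num true =
      match text.findIdx? q with
      | none => none
      | some j => some (num + (j : Int)) := by
  induction text generalizing num with
  | nil => rfl
  | cons h t ih =>
    by_cases hc : q h = true
    · simp [pvLoop, List.findIdx?_cons, hc]
    · have hstep : pvLoop p q (h :: t) num true = pvLoop p q t (num + 1) true := by
        simp [pvLoop, hc]
      rw [hstep, ih, List.findIdx?_cons]
      simp only [hc, Bool.false_eq_true, if_false]
      cases hf : t.findIdx? q with
      | none => simp
      | some j =>
        simp
        omega

theorem pvLoop_false (p q : String → Bool) (text : List String) (num : Int) :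
    pvLoop p q text num false =
      match text.findIdx? p with
      | none => none
      | some i =>
        match (text.drop i).findIdx? q with
        | none => none
        | some j => some (num + (i : Int) + (j : Int)) := by
  induction text generalizing num with
  | nil => rfl
  | cons h t ih =>
    by_cases ho : p h = true
    · by_cases hc : q h = true
      · simp [pvLoop, List.findIdx?_cons, ho, hc]
      · have hstep : pvLoop p q (h :: t) num false = pvLoop p q t (num + 1) true := by
          simp [pvLoop, ho, hc]
        rw [hstep, pvLoop_true, List.findIdx?_cons]
        simp only [ho, if_true, List.drop_zero, List.findIdx?_cons, hc, Bool.false_eq_true,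
          if_false]
        cases hf : t.findIdx? q with
        | none => simp
        | some j =>
          simp
          omega
    · have hstep : pvLoop p q (h :: t) num false = pvLoop p q t (num + 1) false := by
        simp [pvLoop, ho]
      rw [hstep, ih, List.findIdx?_cons]
      simp only [ho, Bool.false_eq_true, if_false]
      cases hf : t.findIdx? p with
      | none => simp
      | some i =>
        simp only [Option.map_some]
        cases hg : (t.drop i).findIdx? q with
        | none => simp [List.drop_succ_cons, hg]
        | some j =>
          simp [List.drop_succ_cons, hg]
          omega

-- ===== VERDICT (by name: the statement is the Claim_ definition above) =====
theorem getAudioDivEndLineNum_spec : Claim_equal_getAudioDivEndLineNum := by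
  intro text _
  unfold Spec_getAudioDivEndLineNum getAudioDivEndLineNum getAudioDivEndLineNum_alt
  rw [goA_eq_pvLoop, pvLoop_false]
  cases hf : text.findIdx? (fun line => PySem.Str.isIn "<div id=\"audioDiv\">" line) with
  | none => rfl
  | some i =>
    dsimp only
    cases hg : (text.drop i).findIdx? (fun line => PySem.Str.isIn "</div>" line) with
    | none => rfl
    | some j =>
      dsimp only
      congr 1
      ring
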